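-- pv_equiv track=rewrite | github.com/pypi-data/pypi-mirror-392 | packages/arrowbit/arrowbit-0.1.2.tar.gz/arrowbit-0.1.2/src/arrowbit/ext/utils.py | outformat
-- ===== SOURCE A (Python) =====
-- def outformat(text: str, color: str = '\033[0m') -> str:
--     newText = ''
--
--     ctrl_matches = {
--         '\n': '\\n',
--         '\r': '\\r',
--         '\t': '\\t',
--     }
--
--     for c in str(text):
--         if c in ctrl_matches.keys():
--             newText += '\033[33m' + ctrl_matches[c] + color
--         else:
--             newText += c
--
--     return newText
-- ===== SOURCE B (Python) =====
-- import re
--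
-- _CTRL = {'\n': '\\n', '\r': '\\r', '\t': '\\t'}
--
-- def outformat(text: str, color: str = '\033[0m') -> str:
--     return re.sub('[\n\r\t]',
--                   lambda m: '\033[33m' + _CTRL[m.group()] + color,
--                   str(text))
-- ===== Notes on version B (the rewrite author's own statement) =====
-- stated objective: idiomatic
-- what changed: Replaced the explicit per-character loop with string accumulation by a single re.sub scan with a per-match callback over the fixed control-character class.
import Mathlib
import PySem

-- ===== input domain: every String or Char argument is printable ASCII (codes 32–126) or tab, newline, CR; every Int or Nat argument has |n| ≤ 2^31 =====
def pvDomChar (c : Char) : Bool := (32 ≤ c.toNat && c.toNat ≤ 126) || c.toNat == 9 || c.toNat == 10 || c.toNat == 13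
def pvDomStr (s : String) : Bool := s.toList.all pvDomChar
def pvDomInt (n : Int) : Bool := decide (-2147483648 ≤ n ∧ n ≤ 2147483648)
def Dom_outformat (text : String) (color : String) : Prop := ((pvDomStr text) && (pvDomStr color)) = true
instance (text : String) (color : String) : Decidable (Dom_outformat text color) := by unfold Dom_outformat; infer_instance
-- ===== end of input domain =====

-- B replaces A's per-character loop with string accumulation by a single regex-style
-- scan (re.sub with a callback); objective: idiomatic.

-- ===== PORT A =====
-- A: loop over the characters, appending to an accumulator string; the dict lookup
-- 'ctrl_matches[c]' is ported as the same three-entry association list.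
def outformatCtrl : PySem.Dict Char (List Char) :=
  PySem.Dict.ofList [('\n', ['\\', 'n']), ('\r', ['\\', 'r']), ('\t', ['\\', 't'])]

def outformat (text : String) (color : String) : String :=
  String.mk <|
    text.toList.foldl (fun newText c =>
      match PySem.Dict.get? outformatCtrl c with
      | some rep => newText ++ (['\x1b', '[', '3', '3', 'm'] ++ rep ++ color.toList)
      | none => newText ++ [c]) []

-- ===== PORT B =====
-- B: re.sub('[\n\r\t]', cb, text) — one left-to-right scan, each character in the
-- class replaced by the callback's value, others copied; inserted text is never
-- rescanned, which flatMap models exactly.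
def outformat_alt (text : String) (color : String) : String :=
  String.mk <|
    text.toList.flatMap (fun c =>
      if c = '\n' ∨ c = '\r' ∨ c = '\t' then
        ['\x1b', '[', '3', '3', 'm'] ++ (PySem.Dict.getD outformatCtrl c []) ++ color.toList
      else [c])

-- ===== PRECONDITION & SPEC =====
def Spec_outformat (text : String) (color : String) (out : String) : Prop := out = outformat_alt text color
instance (text : String) (color : String) (out : String) : Decidable (Spec_outformat text color out) := by unfold Spec_outformat; infer_instance

-- ===== CLAIM (what is proved, stated in full; the proofs are below) =====
def Claim_equal_outformat : Prop := ∀ (text : String) (color : String), Dom_outformat text color → Spec_outformat text color (outformat text color)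

-- ===== LEMMAS AND PROOFS =====
theorem outformatCtrl_eq : outformatCtrl
    = PySem.Dict.mk [('\n', ['\\', 'n']), ('\r', ['\\', 'r']), ('\t', ['\\', 't'])] := by
  decide

theorem outformat_foldl_eq (color : String) (cs : List Char) (acc : List Char) :
    cs.foldl (fun newText c =>
      match PySem.Dict.get? outformatCtrl c with
      | some rep => newText ++ (['\x1b', '[', '3', '3', 'm'] ++ rep ++ color.toList)
      | none => newText ++ [c]) acc
    = acc ++ cs.flatMap (fun c =>
        if c = '\n' ∨ c = '\r' ∨ c = '\t' then
          ['\x1b', '[', '3', '3', 'm'] ++ (PySem.Dict.getD outformatCtrl c []) ++ color.toList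
        else [c]) := by
  induction cs generalizing acc with
  | nil => simp
  | cons c cs ih =>
    simp only [List.foldl_cons, List.flatMap_cons, ih]
    by_cases h : c = '\n' ∨ c = '\r' ∨ c = '\t'
    · rcases h with h | h | h <;> subst h <;>
        simp [outformatCtrl_eq, PySem.Dict.getD, PySem.Dict.get?_mk_cons]
    · have h1 : ¬ (c = '\n') := fun hc => h (Or.inl hc)
      have h2 : ¬ (c = '\r') := fun hc => h (Or.inr (Or.inl hc))
      have h3 : ¬ (c = '\t') := fun hc => h (Or.inr (Or.inr hc))
      have hg : PySem.Dict.get? outformatCtrl c = none := by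
        simp [outformatCtrl_eq, PySem.Dict.get?_mk_cons,
          beq_eq_false_iff_ne.mpr (Ne.symm h1), beq_eq_false_iff_ne.mpr (Ne.symm h2),
          beq_eq_false_iff_ne.mpr (Ne.symm h3), PySem.Dict.get?]
      simp [hg, h]

-- ===== VERDICT (by name: the statement is the Claim_ definition above) =====
theorem outformat_spec : Claim_equal_outformat := by
  intro text color _
  unfold Spec_outformat outformat outformat_alt
  rw [outformat_foldl_eq]
  simp
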